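-- pv_equiv track=rewrite | github.com/Set-Kaung/myatthu_assignments | class09/class09_1.py | SplitType
-- ===== SOURCE A (Python) =====
-- def SplitType(strList):
--     digits = []
--     alphas = []
--     special_chars = []
--
--     for element in strList:
--         special = ''
--         digit = ''
--         alpha = ''
--         for i in element:
--             if i.isdigit():
--                 digit += i
--             elif i.isalpha():
--                 alpha += i
--             else:
--                 special += i
--         alphas.append(alpha)
--         digits.append(digit)
--         special_chars.append(special)
--     return alphas,digits,special_chars
-- ===== SOURCE B (Python) =====
-- def SplitType(strList):
--     alphas = [''.join(c for c in s if c.isalpha()) for s in strList]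
--     digits = [''.join(c for c in s if c.isdigit()) for s in strList]
--     special_chars = [''.join(c for c in s if not c.isdigit() and not c.isalpha()) for s in strList]
--     return alphas, digits, special_chars
-- ===== Notes on version B (the rewrite author's own statement) =====
-- stated objective: simpler
-- what changed: Replaced the single accumulate-loop that partitions each string while building three parallel result lists with three independent list comprehensions over strList, one filtering pass per character category.
import Mathlib
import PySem

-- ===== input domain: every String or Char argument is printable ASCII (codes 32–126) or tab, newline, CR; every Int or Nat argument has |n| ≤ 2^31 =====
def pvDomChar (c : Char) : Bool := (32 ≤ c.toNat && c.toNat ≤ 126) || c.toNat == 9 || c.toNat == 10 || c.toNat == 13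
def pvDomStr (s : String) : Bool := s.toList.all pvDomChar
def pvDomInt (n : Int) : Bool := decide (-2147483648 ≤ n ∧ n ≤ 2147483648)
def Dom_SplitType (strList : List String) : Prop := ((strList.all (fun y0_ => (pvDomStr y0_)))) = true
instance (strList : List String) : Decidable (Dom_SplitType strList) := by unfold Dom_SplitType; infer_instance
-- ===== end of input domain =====

-- B replaces A's single partitioning pass (one inner loop filling three string accumulators
-- while appending to three parallel result lists) with three independent filtering list
-- comprehensions over strList, one per character category; objective: simpler.


-- ===== PORT A =====
-- inner loop: for i in element, building (special, digit, alpha) as char lists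
def SplitTypeInner (cs : List Char) : List Char × List Char × List Char :=
  cs.foldl (fun s i =>
    if PySem.Chars.isdigit i then (s.1, s.2.1 ++ [i], s.2.2)
    else if PySem.Chars.isalpha i then (s.1, s.2.1, s.2.2 ++ [i])
    else (s.1 ++ [i], s.2.1, s.2.2)) ([], [], [])

def SplitType (strList : List String) : List String × List String × List String :=
  let r := strList.foldl (fun acc element =>
    let s := SplitTypeInner element.toList
    (acc.1 ++ [String.ofList s.2.2], acc.2.1 ++ [String.ofList s.2.1], acc.2.2 ++ [String.ofList s.1]))
    ([], [], [])
  (r.1, r.2.1, r.2.2)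

-- ===== PORT B =====
def SplitType_alt (strList : List String) : List String × List String × List String :=
  (strList.map (fun s => String.ofList (s.toList.filter (fun c => PySem.Chars.isalpha c))),
   strList.map (fun s => String.ofList (s.toList.filter (fun c => PySem.Chars.isdigit c))),
   strList.map (fun s => String.ofList (s.toList.filter
     (fun c => !PySem.Chars.isdigit c && !PySem.Chars.isalpha c))))

-- ===== PRECONDITION & SPEC =====
def Spec_SplitType (strList : List String) (out : List String × List String × List String) : Prop := out = SplitType_alt strList
instance (strList : List String) (out : List String × List String × List String) : Decidable (Spec_SplitType strList out) := by unfold Spec_SplitType; infer_instance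

-- ===== CLAIM (what is proved, stated in full; the proofs are below) =====
def Claim_equal_SplitType : Prop := ∀ (strList : List String), Dom_SplitType strList → Spec_SplitType strList (SplitType strList)

-- ===== LEMMAS AND PROOFS =====
theorem splitTypeInner_eq (cs : List Char) :
    SplitTypeInner cs =
      (cs.filter (fun c => !PySem.Chars.isdigit c && !PySem.Chars.isalpha c),
       cs.filter (fun c => PySem.Chars.isdigit c),
       cs.filter (fun c => PySem.Chars.isalpha c)) := by
  suffices h : ∀ (sp dg al : List Char),
      cs.foldl (fun s i =>
        if PySem.Chars.isdigit i then (s.1, s.2.1 ++ [i], s.2.2)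
        else if PySem.Chars.isalpha i then (s.1, s.2.1, s.2.2 ++ [i])
        else (s.1 ++ [i], s.2.1, s.2.2)) (sp, dg, al) =
      (sp ++ cs.filter (fun c => !PySem.Chars.isdigit c && !PySem.Chars.isalpha c),
       dg ++ cs.filter (fun c => PySem.Chars.isdigit c),
       al ++ cs.filter (fun c => PySem.Chars.isalpha c)) by
    simpa [SplitTypeInner] using h [] [] []
  induction cs with
  | nil => intro sp dg al; simp
  | cons c cs ih =>
    intro sp dg al
    by_cases hd : PySem.Chars.isdigit c = true
    · have ha : PySem.Chars.isalpha c = false := by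
        simp only [PySem.Chars.isdigit, Bool.and_eq_true, decide_eq_true_eq] at hd
        simp only [PySem.Chars.isalpha, PySem.Chars.isupper, PySem.Chars.islower,
          Bool.or_eq_false_iff, Bool.and_eq_false_iff]
        rcases hd with ⟨h1, h2⟩
        rw [Char.le_def] at h1 h2
        have e1 : ('0':Char).val.toNat = 48 := rfl
        have e2 : ('9':Char).val.toNat = 57 := rfl
        have e3 : ('A':Char).val.toNat = 65 := rfl
        have e4 : ('a':Char).val.toNat = 97 := rfl
        constructor <;> left <;>
          · simp only [decide_eq_false_iff_not, Char.le_def, UInt32.le_iff_toNat_le] at *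
            omega
      simp [List.foldl_cons, hd, ha, ih]
    · by_cases ha : PySem.Chars.isalpha c = true
      · simp [List.foldl_cons, hd, ha, ih]
      · simp [List.foldl_cons, hd, ha, ih]

theorem splitType_eq_alt (strList : List String) :
    SplitType strList = SplitType_alt strList := by
  suffices h : ∀ (as ds ss : List String),
      strList.foldl (fun acc element =>
        let s := SplitTypeInner element.toList
        (acc.1 ++ [String.ofList s.2.2], acc.2.1 ++ [String.ofList s.2.1], acc.2.2 ++ [String.ofList s.1]))
        (as, ds, ss) =
      (as ++ (SplitType_alt strList).1,
       ds ++ (SplitType_alt strList).2.1,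
       ss ++ (SplitType_alt strList).2.2) by
    have := h [] [] []
    simp only [List.nil_append] at this
    simp [SplitType, this]
  induction strList with
  | nil => intro as ds ss; simp [SplitType_alt]
  | cons x xs ih =>
    intro as ds ss
    simp only [List.foldl_cons]
    rw [ih]
    simp [splitTypeInner_eq, SplitType_alt]

-- ===== VERDICT (by name: the statement is the Claim_ definition above) =====
theorem SplitType_spec : Claim_equal_SplitType := by
  intro strList _
  exact splitType_eq_alt strList
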